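-- pv_equiv track=rewrite | github.com/akib1162100/hacker_rank | flip_matrix.py | flippingMatrix
-- ===== SOURCE A (Python) =====
-- def flippingMatrix(matrix):
--     # Write your code here
--     inter= len(matrix)//2
--     length = len(matrix)
--     sum = 0
--     for i in range(inter):
--         for j in range(inter):
--             sum += max(max(matrix[i][j],matrix[i][length-1-j]),max(matrix[length-1-i][j],matrix[length-1-i][length-1-j]))
--     return sum
-- ===== SOURCE B (Python) =====
-- def flippingMatrix(matrix):
--     n = len(matrix)
--     best = {}
--     for i, row in enumerate(matrix):
--         if i == n - 1 - i:
--             continue  # centre row of an odd-size board belongs to no 4-cell orbit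
--         for j, v in enumerate(row[:n]):
--             if j == n - 1 - j:
--                 continue  # centre column likewise
--             key = (min(i, n - 1 - i), min(j, n - 1 - j))
--             if key not in best or v > best[key]:
--                 best[key] = v
--     return sum(best.values())
-- ===== Notes on version B (the rewrite author's own statement) =====
-- stated objective: alternative
-- what changed: B abandons A's quadrant-index double loop: it makes one pass over all n*n cells, noting each cell under its symmetry-orbit representative key (min(i,n-1-i), min(j,n-1-j)) in a dict of running maxima (skipping the centre row/column of an odd board), and returns the sum of the dict's values.
import Mathlib
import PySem

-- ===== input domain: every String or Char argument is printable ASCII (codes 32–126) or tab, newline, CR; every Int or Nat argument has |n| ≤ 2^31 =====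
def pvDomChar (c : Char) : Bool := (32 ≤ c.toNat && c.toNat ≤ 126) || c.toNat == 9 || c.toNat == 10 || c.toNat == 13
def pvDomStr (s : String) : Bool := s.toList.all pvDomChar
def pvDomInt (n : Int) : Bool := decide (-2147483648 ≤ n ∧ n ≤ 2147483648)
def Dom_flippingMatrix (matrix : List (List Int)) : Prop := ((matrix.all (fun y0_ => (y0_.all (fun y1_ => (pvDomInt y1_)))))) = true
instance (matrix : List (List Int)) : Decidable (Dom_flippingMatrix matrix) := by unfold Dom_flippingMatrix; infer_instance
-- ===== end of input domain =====

-- B replaces A's quadrant-index double loop by one pass over all n×n cells that keeps a dict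
-- from each cell's symmetry-orbit representative key (min(i,n-1-i), min(j,n-1-j)) to the running
-- maximum of that orbit (skipping the centre row/column of an odd board) and sums the dict values;
-- objective: alternative, same O(n^2) cost.

-- ===== PORT A =====
def flippingMatrix (matrix : List (List Int)) : Int :=
  let inter := PySem.Int.floordiv (PySem.List.len matrix) 2
  let length := PySem.List.len matrix
  (PySem.List.pyRange 0 inter 1).foldl (fun sum i =>
    (PySem.List.pyRange 0 inter 1).foldl (fun sum j =>
      sum + max (max (PySem.List.pyGetD (PySem.List.pyGetD matrix i []) j 0)
                     (PySem.List.pyGetD (PySem.List.pyGetD matrix i []) (length - 1 - j) 0))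
                (max (PySem.List.pyGetD (PySem.List.pyGetD matrix (length - 1 - i) []) j 0)
                     (PySem.List.pyGetD (PySem.List.pyGetD matrix (length - 1 - i) []) (length - 1 - j) 0)))
      sum) 0

-- ===== PORT B =====
def flippingMatrix_alt (matrix : List (List Int)) : Int :=
  let n := PySem.List.len matrix
  let best :=
    (PySem.List.enumerate matrix).foldl (fun best p =>
      if p.1 == n - 1 - p.1 then best   -- continue: centre row
      else
        (PySem.List.enumerate (PySem.List.slice p.2 none (some n))).foldl (fun best q =>
          if q.1 == n - 1 - q.1 then best   -- continue: centre column
          else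
            let key : Int × Int := (min p.1 (n - 1 - p.1), min q.1 (n - 1 - q.1))
            if !(PySem.Dict.contains best key) || decide (q.2 > PySem.Dict.getD best key 0)
            then PySem.Dict.insert best key q.2 else best) best)
      (PySem.Dict.empty : PySem.Dict (Int × Int) Int)
  (PySem.Dict.values best).sum

-- ===== PRECONDITION & SPEC =====
-- Pre_ is exactly A's return domain: every row the quadrant loop touches (all rows except the
-- centre row of an odd-size matrix) must be at least as long as the matrix; on shorter touched
-- rows A raises IndexError.
def Pre_flippingMatrix (matrix : List (List Int)) : Prop :=
  ∀ i, i < matrix.length →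
    2 * i + 1 = matrix.length ∨ matrix.length ≤ (matrix.getD i []).length
instance (matrix : List (List Int)) : Decidable (Pre_flippingMatrix matrix) := by
  unfold Pre_flippingMatrix; infer_instance

def pvWitness_flippingMatrix : List (List Int) := [[1, 2], [3, 4]]

def Spec_flippingMatrix (matrix : List (List Int)) (out : Int) : Prop := out = flippingMatrix_alt matrix
instance (matrix : List (List Int)) (out : Int) : Decidable (Spec_flippingMatrix matrix out) := by unfold Spec_flippingMatrix; infer_instance

-- ===== CLAIM (what is proved, stated in full; the proofs are below) =====
def Claim_equal_flippingMatrix : Prop := ∀ (matrix : List (List Int)), Dom_flippingMatrix matrix → Pre_flippingMatrix matrix → Spec_flippingMatrix matrix (flippingMatrix matrix)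

-- ===== LEMMAS AND PROOFS =====

-- cell access by Nat indices, total form
def pvCell (matrix : List (List Int)) (i j : Nat) : Int := (matrix.getD i []).getD j 0

-- the 4-cell symmetry-orbit maximum
def pvM4 (matrix : List (List Int)) (N i j : Nat) : Int :=
  max (max (pvCell matrix i j) (pvCell matrix i (N - 1 - j)))
      (max (pvCell matrix (N - 1 - i) j) (pvCell matrix (N - 1 - i) (N - 1 - j)))

lemma pv_floordiv_two (N : Nat) :
    PySem.Int.floordiv (N : Int) 2 = ((N / 2 : Nat) : Int) := by
  exact_mod_cast PySem.Int.floordiv_natCast N 2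

-- A as a double range sum of orbit maxima
lemma pv_A_eq (matrix : List (List Int)) :
    flippingMatrix matrix =
      ((List.range (matrix.length / 2)).map (fun i =>
        ((List.range (matrix.length / 2)).map (fun j =>
          pvM4 matrix matrix.length i j)).sum)).sum := by
  unfold flippingMatrix
  simp only [PySem.List.len_eq, pv_floordiv_two, PySem.List.pyRange_zero_natCast,
    List.foldl_map, PySem.List.foldl_add, zero_add]
  apply congrArg List.sum
  apply List.map_congr_left
  intro i hi
  apply congrArg List.sum
  apply List.map_congr_left
  intro j hj
  simp only [List.mem_range] at hi hj
  have e1 : ((matrix.length : Int) - 1 - (i : Int)) = ((matrix.length - 1 - i : Nat) : Int) := by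
    omega
  have e2 : ((matrix.length : Int) - 1 - (j : Int)) = ((matrix.length - 1 - j : Nat) : Int) := by
    omega
  rw [e1, e2]
  simp [pvM4, pvCell]

-- B's dict update step, on a (key, value) pair
def pvUpd (d : PySem.Dict (Int × Int) Int) (x : (Int × Int) × Int) : PySem.Dict (Int × Int) Int :=
  if !(PySem.Dict.contains d x.1) || decide (x.2 > PySem.Dict.getD d x.1 0)
  then PySem.Dict.insert d x.1 x.2 else d

-- the stream of (orbit key, cell value) pairs B's two loops feed to the dict
def pvStream (matrix : List (List Int)) : List ((Int × Int) × Int) :=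
  ((PySem.List.enumerate matrix).filter (fun p => !(p.1 == (matrix.length : Int) - 1 - p.1))).flatMap
    (fun p =>
      ((PySem.List.enumerate (PySem.List.slice p.2 none (some (matrix.length : Int)))).filter
          (fun q => !(q.1 == (matrix.length : Int) - 1 - q.1))).map
        (fun q => ((min p.1 ((matrix.length : Int) - 1 - p.1),
                    min q.1 ((matrix.length : Int) - 1 - q.1)), q.2)))

-- running maximum of a value list on top of an optional current best
def pvAcc (o : Option Int) (vs : List Int) : Option Int :=
  vs.foldl (fun acc v => some (acc.elim v (max · v))) o

lemma pv_B_fold (matrix : List (List Int)) :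
    flippingMatrix_alt matrix =
      (PySem.Dict.values ((pvStream matrix).foldl pvUpd PySem.Dict.empty)).sum := by
  unfold flippingMatrix_alt pvStream
  simp only [PySem.List.len_eq, List.foldl_flatMap, List.foldl_map]
  congr 1
  congr 1
  rw [← PySem.List.foldl_if_eq_foldl_filter (p := fun p : Int × List Int => !(p.1 == (matrix.length : Int) - 1 - p.1))]
  apply PySem.List.foldl_congr_mem
  intro acc p _
  cases h : (p.1 == (matrix.length : Int) - 1 - p.1)
  · simp only [h, Bool.not_false, if_true, Bool.false_eq_true, if_false]
    rw [← PySem.List.foldl_if_eq_foldl_filter (p := fun q : Int × Int => !(q.1 == (matrix.length : Int) - 1 - q.1))]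
    apply PySem.List.foldl_congr_mem
    intro acc q _
    cases h2 : (q.1 == (matrix.length : Int) - 1 - q.1) <;>
      simp only [h2, Bool.not_true, Bool.not_false, if_true, Bool.false_eq_true, if_false] <;> rfl
  · simp only [h, Bool.not_true, if_true, Bool.false_eq_true, if_false]

lemma pv_upd_get? (d : PySem.Dict (Int × Int) Int) (x : (Int × Int) × Int) (k : Int × Int) :
    PySem.Dict.get? (pvUpd d x) k =
      if x.1 = k then some ((PySem.Dict.get? d k).elim x.2 (max · x.2))
      else PySem.Dict.get? d k := by
  unfold pvUpd
  by_cases hk : x.1 = k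
  · subst hk
    simp only [if_pos rfl]
    cases hg : PySem.Dict.get? d x.1 with
    | none =>
        have hc : PySem.Dict.contains d x.1 = false := by
          rw [PySem.Dict.contains_eq_isSome_get?, hg]; rfl
        simp [hc, PySem.Dict.get?_insert_self]
    | some c =>
        have hc : PySem.Dict.contains d x.1 = true := by
          rw [PySem.Dict.contains_eq_isSome_get?, hg]; rfl
        have hgd : PySem.Dict.getD d x.1 0 = c := PySem.Dict.getD_of_get?_eq_some d 0 hg
        simp only [hc, Bool.not_true, Bool.false_or, hgd, Option.elim]
        by_cases hlt : c < x.2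
        · simp [hlt, PySem.Dict.get?_insert_self, max_eq_right (le_of_lt hlt)]
        · simp [hlt, hg, max_eq_left (not_lt.mp hlt)]
  · rw [if_neg hk]
    split_ifs with h
    · exact PySem.Dict.get?_insert_of_ne _ _ (fun he => hk he.symm)
    · rfl

lemma pv_foldl_get? (L : List ((Int × Int) × Int)) (d : PySem.Dict (Int × Int) Int)
    (k : Int × Int) :
    PySem.Dict.get? (L.foldl pvUpd d) k =
      pvAcc (PySem.Dict.get? d k) ((L.filter (fun x => x.1 == k)).map (·.2)) := by
  induction L generalizing d with
  | nil => rfl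
  | cons x t ih =>
      rw [List.foldl_cons, ih, List.filter_cons]
      by_cases hk : x.1 = k
      · simp [hk, pv_upd_get?, pvAcc]
      · have : (x.1 == k) = false := by simpa using hk
        simp [this, pv_upd_get?, hk]

lemma pv_upd_keys (d : PySem.Dict (Int × Int) Int) (x : (Int × Int) × Int) :
    PySem.Dict.keys (pvUpd d x) = PySem.Set.add (PySem.Dict.keys d) x.1 := by
  unfold pvUpd
  by_cases hc : PySem.Dict.contains d x.1 = true
  · have hmem : x.1 ∈ PySem.Dict.keys d := (PySem.Dict.contains_iff_mem_keys d x.1).mp hc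
    have hadd : PySem.Set.add (PySem.Dict.keys d) x.1 = PySem.Dict.keys d := by
      simp [PySem.Set.add, hmem]
    rw [hadd]
    split_ifs with h
    · exact PySem.Dict.keys_insert_of_contains d x.2 hc
    · rfl
  · have hcf : PySem.Dict.contains d x.1 = false := by simpa using hc
    have hmem : x.1 ∉ PySem.Dict.keys d := fun hmem =>
      hc ((PySem.Dict.contains_iff_mem_keys d x.1).mpr hmem)
    have hadd : PySem.Set.add (PySem.Dict.keys d) x.1 = PySem.Dict.keys d ++ [x.1] := by
      simp [PySem.Set.add, hmem]
    have hcond : (!PySem.Dict.contains d x.1 || decide (x.2 > PySem.Dict.getD d x.1 0)) = true := by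
      simp [hcf]
    rw [hadd, if_pos hcond]
    exact PySem.Dict.keys_insert_of_not_contains d x.2 hcf

lemma pv_foldl_keys (L : List ((Int × Int) × Int)) (d : PySem.Dict (Int × Int) Int) :
    PySem.Dict.keys (L.foldl pvUpd d) =
      PySem.Set.update (PySem.Dict.keys d) (L.map (·.1)) := by
  induction L generalizing d with
  | nil => rfl
  | cons x t ih =>
      rw [List.foldl_cons, ih, pv_upd_keys]
      rfl

lemma pv_enum_filter {α : Type} (xs : List α) (d : α) (P : Int × α → Bool) :
    (PySem.List.enumerate xs).filter P =
      ((List.range xs.length).filter (fun (j : Nat) => P ((j : Int), xs.getD j d))).map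
        (fun (j : Nat) => ((j : Int), xs.getD j d)) := by
  rw [PySem.List.enumerate_eq_map_pyRange xs d, PySem.List.len_eq,
    PySem.List.pyRange_zero_natCast, List.map_map, List.filter_map]
  have hmc : ∀ ps : List Nat, ps.map ((fun j : Int => (j, PySem.List.pyGetD xs j d)) ∘ fun k : Nat => (k : Int))
      = ps.map (fun (j : Nat) => ((j : Int), xs.getD j d)) := by
    intro ps; apply List.map_congr_left; intro j _
    simp [Function.comp, PySem.List.pyGetD_natCast]
  rw [hmc]
  congr 1
  apply List.filter_congr
  intro j _
  simp [Function.comp, PySem.List.pyGetD_natCast]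

lemma pv_filter_range_two (N x y : Nat) (P : Nat → Bool) (hx : x < y) (hy : y < N)
    (hP : ∀ j, j < N → (P j = true ↔ (j = x ∨ j = y))) :
    (List.range N).filter P = [x, y] := by
  have h1 : N = (y + 1) + (N - y - 1) := by omega
  rw [h1, List.range_add, List.filter_append]
  have h2 : (y + 1) = (x + 1) + (y - x - 1) + 1 := by omega
  rw [h2, List.range_succ, List.range_add, List.range_succ, List.filter_append,
    List.filter_append, List.filter_append]
  have e0 : (List.range x).filter P = [] := by
    rw [List.filter_eq_nil_iff]; intro a ha hpa
    rw [List.mem_range] at ha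
    rcases (hP a (by omega)).mp hpa with h | h <;> omega
  have e1 : List.filter P [x] = [x] := by
    simp [List.filter, (hP x (by omega)).mpr (Or.inl rfl)]
  have e2 : ((List.range (y - x - 1)).map (fun k => (x + 1) + k)).filter P = [] := by
    rw [List.filter_eq_nil_iff]; intro a ha hpa
    rcases List.mem_map.mp ha with ⟨k, hk, rfl⟩
    rw [List.mem_range] at hk
    rcases (hP _ (by omega)).mp hpa with h | h <;> omega
  have e3 : List.filter P [x + 1 + (y - x - 1)] = [y] := by
    have hxy : x + 1 + (y - x - 1) = y := by omega
    rw [hxy]; simp [List.filter, (hP y (by omega)).mpr (Or.inr rfl)]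
  have e4 : ((List.range (N - y - 1)).map (fun k => (y + 1) + k)).filter P = [] := by
    rw [List.filter_eq_nil_iff]; intro a ha hpa
    rcases List.mem_map.mp ha with ⟨k, hk, rfl⟩
    rw [List.mem_range] at hk
    rcases (hP _ (by omega)).mp hpa with h | h <;> omega
  rw [e0, e1, e2, e3]
  have e4' : ((List.range (N - y - 1)).map (fun k => (x + 1 + (y - x - 1) + 1) + k)).filter P = [] := by
    rw [List.filter_eq_nil_iff]; intro a ha hpa
    rcases List.mem_map.mp ha with ⟨k, hk, rfl⟩
    rw [List.mem_range] at hk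
    rcases (hP _ (by omega)).mp hpa with h | h <;> omega
  rw [e4']
  rfl

lemma pv_flatMap_congr_nil {α β : Type} (l : List α) (Q : α → Bool) (h : α → List β)
    (hn : ∀ p ∈ l, Q p = false → h p = []) :
    l.flatMap h = (l.filter Q).flatMap h := by
  induction l with
  | nil => rfl
  | cons x t ih =>
      rw [List.flatMap_cons, List.filter_cons]
      cases hq : Q x with
      | true => rw [if_pos rfl, List.flatMap_cons, ih (fun p hp => hn p (List.mem_cons_of_mem _ hp))]
      | false =>
          rw [hn x List.mem_cons_self hq]
          simp only [Bool.false_eq_true, if_false]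
          exact ih (fun p hp => hn p (List.mem_cons_of_mem _ hp))

lemma pv_getD_take (row : List Int) (N j : Nat) (hj : j < N) (hlen : N ≤ row.length) :
    (row.take N).getD j 0 = row.getD j 0 := by
  rw [List.getD_eq_getElem _ _ (by simp [List.length_take]; omega),
    List.getElem_take, List.getD_eq_getElem _ _ (by omega)]

lemma pv_row_filter (matrix : List (List Int)) (i a b : Nat)
    (hN : i < matrix.length) (hrep : min i (matrix.length - 1 - i) = a)
    (hb : b < matrix.length / 2)
    (hlen : matrix.length ≤ (matrix.getD i []).length) :
    ((((PySem.List.enumerate (PySem.List.slice (matrix.getD i []) none (some (matrix.length : Int)))).filter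
          (fun q => !(q.1 == (matrix.length : Int) - 1 - q.1))).map
        (fun q => ((min ((i : Nat) : Int) ((matrix.length : Int) - 1 - ((i : Nat) : Int)),
                    min q.1 ((matrix.length : Int) - 1 - q.1)), q.2))).filter
        (fun x => x.1 == (((a : Nat) : Int), ((b : Nat) : Int)))).map (·.2) =
      [pvCell matrix i b, pvCell matrix i (matrix.length - 1 - b)] := by
  have hNpos : 0 < matrix.length := by omega
  have hrepI : min ((i : Nat) : Int) ((matrix.length : Int) - 1 - ((i : Nat) : Int)) = ((a : Nat) : Int) := by
    omega
  rw [PySem.List.slice_to_natCast, List.filter_map, List.filter_filter]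
  rw [pv_enum_filter ((matrix.getD i []).take matrix.length) 0]
  have hlent : ((matrix.getD i []).take matrix.length).length = matrix.length := by
    rw [List.length_take]; omega
  rw [hlent]
  rw [pv_filter_range_two matrix.length b (matrix.length - 1 - b)
      _ (by omega) (by omega) ?_]
  · have h1 : pvCell matrix i b = ((matrix.getD i []).take matrix.length).getD b 0 := by
      rw [pv_getD_take _ _ _ (by omega) hlen]; rfl
    have h2 : pvCell matrix i (matrix.length - 1 - b) =
        ((matrix.getD i []).take matrix.length).getD (matrix.length - 1 - b) 0 := by
      rw [pv_getD_take _ _ _ (by omega) hlen]; rfl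
    simp [h1, h2]
  · intro j hj
    simp only [Function.comp, beq_iff_eq, Prod.mk.injEq, Bool.and_eq_true, Bool.not_eq_eq_eq_not,
      Bool.not_true, beq_eq_false_iff_ne, ne_eq, decide_eq_true_eq]
    omega

lemma pv_stream_filter (matrix : List (List Int)) (hpre : Pre_flippingMatrix matrix)
    (a b : Nat) (ha : a < matrix.length / 2) (hb : b < matrix.length / 2) :
    ((pvStream matrix).filter (fun x => x.1 == (((a : Nat) : Int), ((b : Nat) : Int)))).map (·.2) =
      [pvCell matrix a b, pvCell matrix a (matrix.length - 1 - b),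
       pvCell matrix (matrix.length - 1 - a) b,
       pvCell matrix (matrix.length - 1 - a) (matrix.length - 1 - b)] := by
  have hNpos : 0 < matrix.length := by omega
  unfold pvStream
  rw [List.filter_flatMap]
  rw [pv_flatMap_congr_nil _
      (fun p => p.1 == ((a : Nat) : Int) || p.1 == ((matrix.length - 1 - a : Nat) : Int)) _ ?_]
  · rw [List.filter_filter, pv_enum_filter matrix ([] : List Int)]
    rw [pv_filter_range_two matrix.length a (matrix.length - 1 - a) _ (by omega) (by omega) ?_]
    · -- flatMap over the two rows
      rw [List.map_cons, List.map_cons, List.map_nil, List.flatMap_cons, List.flatMap_cons,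
        List.flatMap_nil, List.append_nil, List.map_append]
      have hla : matrix.length ≤ (matrix.getD a []).length := by
        rcases hpre a (by omega) with h | h
        · omega
        · exact h
      have hla2 : matrix.length ≤ (matrix.getD (matrix.length - 1 - a) []).length := by
        rcases hpre (matrix.length - 1 - a) (by omega) with h | h
        · omega
        · exact h
      rw [pv_row_filter matrix a a b (by omega) (by omega) hb hla,
        pv_row_filter matrix (matrix.length - 1 - a) a b (by omega) (by omega) hb hla2]
      rfl
    · intro j hj
      simp only [Function.comp, Bool.and_eq_true, Bool.or_eq_true, beq_iff_eq,
        Bool.not_eq_eq_eq_not, Bool.not_true, beq_eq_false_iff_ne, ne_eq]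
      omega
  · intro p hp hQ
    rw [List.filter_eq_nil_iff]
    intro x hx hpx
    rcases List.mem_map.mp hx with ⟨q, hq, rfl⟩
    rw [List.mem_filter] at hp
    rcases (PySem.List.mem_enumerate_iff matrix 0 p).mp hp.1 with ⟨i, hi, rfl⟩
    simp only [Bool.or_eq_false_iff, beq_eq_false_iff_ne, ne_eq] at hQ
    simp only [beq_iff_eq, Prod.mk.injEq] at hpx
    have : min ((0 : Int) + (i : Int)) ((matrix.length : Int) - 1 - ((0 : Int) + (i : Int))) ≠ ((a : Nat) : Int) := by
      omega
    exact this hpx.1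
lemma pv_getD_final (matrix : List (List Int)) (hpre : Pre_flippingMatrix matrix)
    (a b : Nat) (ha : a < matrix.length / 2) (hb : b < matrix.length / 2) :
    PySem.Dict.getD ((pvStream matrix).foldl pvUpd PySem.Dict.empty)
        ((((a : Nat) : Int), ((b : Nat) : Int))) 0 = pvM4 matrix matrix.length a b := by
  have h := pv_foldl_get? (pvStream matrix) PySem.Dict.empty
      ((((a : Nat) : Int), ((b : Nat) : Int)))
  rw [PySem.Dict.get?_empty, pv_stream_filter matrix hpre a b ha hb] at h
  have h2 : pvAcc none
      [pvCell matrix a b, pvCell matrix a (matrix.length - 1 - b),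
       pvCell matrix (matrix.length - 1 - a) b,
       pvCell matrix (matrix.length - 1 - a) (matrix.length - 1 - b)] =
      some (pvM4 matrix matrix.length a b) := by
    simp [pvAcc, pvM4, max_assoc]
  rw [h2] at h
  exact PySem.Dict.getD_of_get?_eq_some _ 0 h

lemma pv_keys_final (matrix : List (List Int)) :
    PySem.Dict.keys ((pvStream matrix).foldl pvUpd PySem.Dict.empty) =
      PySem.Set.ofList ((pvStream matrix).map (·.1)) := by
  rw [pv_foldl_keys, PySem.Dict.keys_empty, PySem.Set.ofList_eq_foldl]
  rfl

lemma pv_mem_stream_keys (matrix : List (List Int)) (hpre : Pre_flippingMatrix matrix)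
    (k : Int × Int) :
    k ∈ (pvStream matrix).map (·.1) ↔
      ∃ a b : Nat, a < matrix.length / 2 ∧ b < matrix.length / 2 ∧
        k = ((((a : Nat) : Int), ((b : Nat) : Int))) := by
  unfold pvStream
  constructor
  · intro hk
    rcases List.mem_map.mp hk with ⟨x, hx, rfl⟩
    rcases List.mem_flatMap.mp hx with ⟨p, hp, hxp⟩
    rw [List.mem_filter] at hp
    rcases (PySem.List.mem_enumerate_iff matrix 0 p).mp hp.1 with ⟨i, hi, rfl⟩
    have hic : ¬ ((0 : Int) + (i : Nat) = (matrix.length : Int) - 1 - ((0 : Int) + (i : Nat))) := by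
      have := hp.2
      simp only [Bool.not_eq_eq_eq_not, Bool.not_true, beq_eq_false_iff_ne, ne_eq] at this
      exact this
    rcases List.mem_map.mp hxp with ⟨q, hq, rfl⟩
    rw [List.mem_filter] at hq
    rcases (PySem.List.mem_enumerate_iff _ 0 q).mp hq.1 with ⟨j, hj, rfl⟩
    have hjc : ¬ ((0 : Int) + (j : Nat) = (matrix.length : Int) - 1 - ((0 : Int) + (j : Nat))) := by
      have := hq.2
      simp only [Bool.not_eq_eq_eq_not, Bool.not_true, beq_eq_false_iff_ne, ne_eq] at this
      exact this
    rw [PySem.List.slice_to_natCast, List.length_take] at hj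
    refine ⟨min i (matrix.length - 1 - i), min j (matrix.length - 1 - j), by omega, by omega, ?_⟩
    have e1 : min ((0 : Int) + (i : Nat)) ((matrix.length : Int) - 1 - ((0 : Int) + (i : Nat)))
        = ((min i (matrix.length - 1 - i) : Nat) : Int) := by omega
    have e2 : min ((0 : Int) + (j : Nat)) ((matrix.length : Int) - 1 - ((0 : Int) + (j : Nat)))
        = ((min j (matrix.length - 1 - j) : Nat) : Int) := by omega
    simp only [e1, e2]
  · rintro ⟨a, b, ha, hb, rfl⟩
    have hNpos : 0 < matrix.length := by omega
    have hla : matrix.length ≤ (matrix.getD a []).length := by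
      rcases hpre a (by omega) with h | h
      · omega
      · exact h
    apply List.mem_map.mpr
    set t := PySem.List.slice (matrix.getD a []) none (some (matrix.length : Int)) with ht
    have htl : t.length = matrix.length := by
      rw [ht, PySem.List.slice_to_natCast, List.length_take]; omega
    refine ⟨((min ((a : Nat) : Int) ((matrix.length : Int) - 1 - ((a : Nat) : Int)),
              min ((b : Nat) : Int) ((matrix.length : Int) - 1 - ((b : Nat) : Int))),
             t.getD b 0), ?_, ?_⟩
    · apply List.mem_flatMap.mpr
      refine ⟨(((a : Nat) : Int), matrix.getD a []), ?_, ?_⟩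
      · rw [List.mem_filter]
        constructor
        · apply (PySem.List.mem_enumerate_iff matrix 0 _).mpr
          refine ⟨a, by omega, ?_⟩
          rw [List.getD_eq_getElem matrix [] (by omega)]
          simp
        · simp only [Bool.not_eq_eq_eq_not, Bool.not_true, beq_eq_false_iff_ne, ne_eq]
          omega
      · apply List.mem_map.mpr
        refine ⟨(((b : Nat) : Int), t.getD b 0), ?_, rfl⟩
        rw [List.mem_filter]
        constructor
        · apply (PySem.List.mem_enumerate_iff t 0 _).mpr
          refine ⟨b, by omega, ?_⟩
          rw [List.getD_eq_getElem t 0 (by omega)]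
          simp
        · simp only [Bool.not_eq_eq_eq_not, Bool.not_true, beq_eq_false_iff_ne, ne_eq]
          omega
    · have e1 : min ((a : Nat) : Int) ((matrix.length : Int) - 1 - ((a : Nat) : Int)) = ((a : Nat) : Int) := by omega
      have e2 : min ((b : Nat) : Int) ((matrix.length : Int) - 1 - ((b : Nat) : Int)) = ((b : Nat) : Int) := by omega
      simp [e1, e2]

def pvLex (H : Nat) : List (Int × Int) :=
  (List.range H).flatMap (fun a => (List.range H).map (fun b => (((a : Nat) : Int), ((b : Nat) : Int))))

lemma pv_lex_eq_product (H : Nat) :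
    pvLex H = ((List.range H) ×ˢ (List.range H)).map
      (fun p => (((p.1 : Nat) : Int), ((p.2 : Nat) : Int))) := by
  rw [show ((List.range H) ×ˢ (List.range H)) =
      (List.range H).flatMap (fun a => (List.range H).map (a, ·)) from rfl,
    List.map_flatMap]
  unfold pvLex
  congr 1
  funext a
  simp [Function.comp_def]

lemma pv_lex_nodup (H : Nat) : (pvLex H).Nodup := by
  rw [pv_lex_eq_product]
  apply List.Nodup.map
  · intro p q h
    simp only [Prod.mk.injEq] at h
    exact Prod.ext (by exact_mod_cast h.1) (by exact_mod_cast h.2)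
  · exact List.Nodup.product (List.nodup_range) (List.nodup_range)

lemma pv_lex_mem (H : Nat) (k : Int × Int) :
    k ∈ pvLex H ↔ ∃ a b : Nat, a < H ∧ b < H ∧ k = ((((a : Nat) : Int), ((b : Nat) : Int))) := by
  unfold pvLex
  constructor
  · intro hk
    rcases List.mem_flatMap.mp hk with ⟨a, haa, hk2⟩
    rcases List.mem_map.mp hk2 with ⟨b, hbb, rfl⟩
    exact ⟨a, b, List.mem_range.mp haa, List.mem_range.mp hbb, rfl⟩
  · rintro ⟨a, b, ha, hb, rfl⟩
    exact List.mem_flatMap.mpr ⟨a, List.mem_range.mpr ha,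
      List.mem_map.mpr ⟨b, List.mem_range.mpr hb, rfl⟩⟩

lemma pv_B_sum (matrix : List (List Int)) (hpre : Pre_flippingMatrix matrix) :
    (PySem.Dict.values ((pvStream matrix).foldl pvUpd PySem.Dict.empty)).sum =
      ((List.range (matrix.length / 2)).map (fun i =>
        ((List.range (matrix.length / 2)).map (fun j =>
          pvM4 matrix matrix.length i j)).sum)).sum := by
  set d := (pvStream matrix).foldl pvUpd PySem.Dict.empty with hd
  have hnd : (PySem.Dict.keys d).Nodup := by
    rw [hd, pv_keys_final]; exact PySem.Set.nodup_ofList _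
  rw [PySem.Dict.values_eq_map_keys d hnd 0]
  have hmem : ∀ k, k ∈ PySem.Dict.keys d ↔ k ∈ pvLex (matrix.length / 2) := by
    intro k
    rw [hd, pv_keys_final, PySem.Set.mem_ofList, pv_mem_stream_keys matrix hpre, pv_lex_mem]
  have hperm : (PySem.Dict.keys d).Perm (pvLex (matrix.length / 2)) :=
    (List.perm_ext_iff_of_nodup hnd (pv_lex_nodup _)).mpr hmem
  rw [(hperm.map (fun k => PySem.Dict.getD d k 0)).sum_eq]
  unfold pvLex
  rw [List.map_flatMap, List.flatMap_def, List.sum_flatten, List.map_map]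
  apply congrArg List.sum
  apply List.map_congr_left
  intro a hamem
  simp only [Function.comp, List.map_map]
  apply congrArg List.sum
  apply List.map_congr_left
  intro b hbmem
  simp only [Function.comp]
  rw [hd]
  exact pv_getD_final matrix hpre a b (List.mem_range.mp hamem) (List.mem_range.mp hbmem)

-- ===== VERDICT (by name: the statement is the Claim_ definition above) =====
theorem flippingMatrix_spec : Claim_equal_flippingMatrix := by
  intro matrix _ hpre
  unfold Spec_flippingMatrix
  rw [pv_A_eq matrix, pv_B_fold matrix, pv_B_sum matrix hpre]
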